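-- pv_equiv track=rewrite | github.com/KENSEI-dev/Serpen | hackathons/ucode13.py | check_grid
-- ===== SOURCE A (Python) =====
-- def check_grid(grid):
--     m=len(grid)
--     n=len(grid[0])
--     list=[]
--     for i in range(m):
--         for j in range(n):
--             if i==0 or i==m-1 or j==0 or j==n-1:
--                 list.append(grid[i][j])
--     return list
-- ===== SOURCE B (Python) =====
-- def check_grid(grid):
--     n = len(grid[0])
--     m = len(grid)
--     if n == 0:
--         return []
--     if m == 1:
--         return list(grid[0])
--     out = list(grid[0])
--     for row in grid[1:-1]:
--         out.append(row[0])
--         if n > 1: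
--             out.append(row[n - 1])
--     out.extend(grid[-1][:n])
--     return out
-- ===== Notes on version B (the rewrite author's own statement) =====
-- stated objective: faster
-- what changed: Instead of scanning all m*n cells and testing each for border membership, B emits the first row, then only the two edge elements of each middle row, then the last row, touching O(m+n) cells.
import Mathlib
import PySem

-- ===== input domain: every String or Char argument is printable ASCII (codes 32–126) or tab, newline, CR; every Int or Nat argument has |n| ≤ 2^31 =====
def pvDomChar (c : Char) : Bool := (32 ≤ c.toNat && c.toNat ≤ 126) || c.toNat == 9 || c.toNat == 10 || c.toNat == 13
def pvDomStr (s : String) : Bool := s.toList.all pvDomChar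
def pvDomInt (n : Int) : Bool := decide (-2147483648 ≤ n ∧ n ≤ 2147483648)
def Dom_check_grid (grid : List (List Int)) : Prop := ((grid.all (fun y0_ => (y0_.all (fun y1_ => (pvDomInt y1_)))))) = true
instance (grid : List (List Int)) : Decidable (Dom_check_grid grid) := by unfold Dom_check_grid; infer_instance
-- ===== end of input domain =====

-- B visits only the border cells (first row, the two edge elements of each middle row, last
-- row) instead of A's scan over all m*n cells with a per-cell border test.

-- ===== PORT A =====
def check_grid (grid : List (List Int)) : List Int :=
  let m := grid.length
  let n := (PySem.List.pyGetD grid 0 []).length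
  (PySem.List.pyRange 0 (m : Int) 1).foldl (fun acc i =>
    (PySem.List.pyRange 0 (n : Int) 1).foldl (fun acc2 j =>
      if i == 0 || i == (m : Int) - 1 || j == 0 || j == (n : Int) - 1 then
        acc2 ++ [PySem.List.pyGetD (PySem.List.pyGetD grid i []) j 0]
      else acc2) acc) []

-- ===== PORT B =====
def check_grid_alt (grid : List (List Int)) : List Int :=
  let n := (PySem.List.pyGetD grid 0 []).length
  let m := grid.length
  if n == 0 then []
  else if m == 1 then PySem.List.pyGetD grid 0 []
  else
    let out := PySem.List.pyGetD grid 0 []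
    let out := (PySem.List.slice grid (some 1) (some (-1))).foldl (fun acc row =>
      (acc ++ [PySem.List.pyGetD row 0 0]) ++
        (if (n : Int) > 1 then [PySem.List.pyGetD row ((n : Int) - 1) 0] else [])) out
    out ++ PySem.List.slice (PySem.List.pyGetD grid (-1) []) none (some (n : Int))

-- ===== PRECONDITION & SPEC =====
-- Pre_ excludes exactly the inputs where Python A raises an IndexError: the empty grid
-- (grid[0] fails) and grids with some row shorter than the first row (grid[i][j],
-- resp. grid[i][n-1], fails there).
def Pre_check_grid (grid : List (List Int)) : Prop :=
  grid ≠ [] ∧ ∀ row ∈ grid, (grid.headD []).length ≤ row.length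
instance (grid : List (List Int)) : Decidable (Pre_check_grid grid) := by
  unfold Pre_check_grid; infer_instance

def pvWitness_check_grid : List (List Int) := [[1, 2, 3], [4, 5, 6], [7, 8, 9]]

def Spec_check_grid (grid : List (List Int)) (out : List Int) : Prop := out = check_grid_alt grid
instance (grid : List (List Int)) (out : List Int) : Decidable (Spec_check_grid grid out) := by
  unfold Spec_check_grid; infer_instance

-- ===== CLAIM (what is proved, stated in full; the proofs are below) =====
def Claim_equal_check_grid : Prop :=
  ∀ (grid : List (List Int)), Dom_check_grid grid → Pre_check_grid grid →
    Spec_check_grid grid (check_grid grid)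

-- ===== LEMMAS AND PROOFS =====

-- [f(row[j]) for j in range(n)] collects the first n elements of the row
theorem mapTake (row : List Int) (n : Nat) (h : n ≤ row.length) :
    (PySem.List.pyRange 0 (n : Int) 1).map (fun j => PySem.List.pyGetD row j 0) = row.take n := by
  induction n with
  | zero => simp [PySem.List.pyRange_one_eq_nil]
  | succ k ih =>
    rw [show ((k+1 : Nat) : Int) = (k : Int) + 1 by push_cast; ring,
        PySem.List.pyRange_one_succ_right (by positivity)]
    rw [List.map_append, ih (by omega)]
    have hk : k < row.length := by omega
    simp [List.take_add_one, PySem.List.pyGetD_natCast, List.getD]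
    rw [List.getElem?_eq_getElem hk]
    simp

-- the column indices A keeps on a middle row are 0 and (when n > 1) n-1
theorem filterBorder (n : Nat) (h1 : 1 ≤ n) :
    (PySem.List.pyRange 0 (n : Int) 1).filter (fun j => j == 0 || j == (n : Int) - 1)
      = 0 :: (if (1 : Int) < (n : Int) then [(n : Int) - 1] else []) := by
  rw [PySem.List.pyRange_one_cons (by exact_mod_cast h1)]
  rw [List.filter_cons]
  simp only [show ((0:Int) == 0 || (0:Int) == (n:Int) - 1) = true by simp, if_true]
  congr 1
  by_cases hn : (1 : Int) < (n : Int)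
  · have hsplit : PySem.List.pyRange (0+1) (n : Int) 1
        = PySem.List.pyRange 1 ((n : Int) - 1) 1 ++ [(n : Int) - 1] := by
      rw [← PySem.List.pyRange_one_succ_right (by omega)]; norm_num
    rw [hsplit, List.filter_append]
    rw [List.filter_eq_nil_iff.mpr, if_pos hn]
    · simp
    · intro j hj
      have := (PySem.List.mem_pyRange_one).mp hj
      simp only [Bool.or_eq_true, beq_iff_eq, not_or]
      omega
  · have hn1 : (n : Int) = 1 := by omega
    rw [if_neg hn]
    rw [hn1]
    norm_num [PySem.List.pyRange_one_eq_nil]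

-- grid[1:-1] on r0 :: mid ++ [rl] is mid
theorem hsliceMid (r0 rl : List Int) (mid : List (List Int)) :
    PySem.List.slice (r0 :: (mid ++ [rl])) (some 1) (some (-1)) = mid := by
  simp [PySem.List.slice, PySem.List.clampIdx]
  rw [if_neg (by omega)]
  simp [List.take_left']

-- grid[m-1] on r0 :: mid ++ [rl] is rl
theorem getLastIdx (r0 rl : List Int) (mid : List (List Int)) :
    PySem.List.pyGetD (r0 :: (mid ++ [rl])) ((mid.length + 1 : Nat) : Int) [] = rl := by
  rw [PySem.List.pyGetD_natCast]
  simp [List.getD]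

-- the rows A indexes as grid[i], i = 1 .. m-2, are exactly mid
theorem mapMid (r0 rl : List Int) (mid : List (List Int)) :
    (PySem.List.pyRange 1 ((mid.length + 1 : Nat) : Int) 1).map
      (fun i => PySem.List.pyGetD (r0 :: (mid ++ [rl])) i []) = mid := by
  have hfull := PySem.List.map_pyGetD_pyRange' (xs := r0 :: (mid ++ [rl])) (a := 1) (d := ([] : List Int)) (by norm_num)
  rw [show ((r0 :: (mid ++ [rl])).length : Int) = ((mid.length + 1 : Nat) : Int) + 1 by simp,
      PySem.List.pyRange_one_succ_right (by push_cast; omega), List.map_append] at hfull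
  simp only [List.map_cons, List.map_nil, getLastIdx] at hfull
  have hdrop : (r0 :: (mid ++ [rl])).drop (1 : Int).toNat = mid ++ [rl] := by simp
  rw [hdrop] at hfull
  exact List.append_cancel_right hfull

theorem check_grid_eq (grid : List (List Int)) (hne : grid ≠ [])
    (hlen : ∀ row ∈ grid, (grid.headD []).length ≤ row.length) :
    check_grid grid = check_grid_alt grid := by
  obtain ⟨r0, rs, rfl⟩ : ∃ r0 rs, grid = r0 :: rs := by
    cases grid with
    | nil => exact absurd rfl hne
    | cons a l => exact ⟨a, l, rfl⟩
  clear hne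
  simp only [List.headD_cons] at hlen
  unfold check_grid check_grid_alt
  simp only [PySem.List.pyGetD_zero_cons]
  simp only [PySem.List.foldl_append_if, PySem.List.foldl_append_eq_flatMap]
  by_cases hn0 : r0.length = 0
  · -- n = 0 : A collects nothing, B returns []
    simp [hn0, PySem.List.pyRange_one_eq_nil]
  · rcases List.eq_nil_or_concat rs with rfl | ⟨mid, rl, rfl⟩
    · -- single row: every cell is border; B returns the whole first row
      simp only [List.length_cons, List.length_nil]
      rw [show ((0+1:Nat):Int) = (0:Int)+1 by norm_num, PySem.List.pyRange_one_singleton]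
      simp only [List.flatMap_cons, List.flatMap_nil, List.append_nil, List.nil_append]
      simp only [beq_self_eq_true, Bool.true_or, List.filter_true]
      rw [PySem.List.pyGetD_zero_cons, mapTake r0 r0.length le_rfl, List.take_length]
      simp [hn0]
    · -- at least two rows: grid = r0 :: mid ++ [rl]
      have hrl : r0.length ≤ rl.length := hlen rl (by simp)
      simp only [List.concat_eq_append, List.length_cons, List.length_append, List.length_nil]
      set M := mid.length with hM
      set n := r0.length with hn
      have hsplitM : PySem.List.pyRange 0 (((M + 1 + 1 : Nat) : Int)) 1
          = 0 :: (PySem.List.pyRange 1 ((M + 1 : Nat) : Int) 1 ++ [((M + 1 : Nat) : Int)]) := by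
        rw [PySem.List.pyRange_one_cons (by push_cast; omega)]
        rw [show ((M + 1 + 1 : Nat) : Int) = ((M + 1 : Nat) : Int) + 1 by push_cast; ring]
        rw [PySem.List.pyRange_one_succ_right (by push_cast; omega)]
        norm_num
      rw [hsplitM]
      simp only [List.flatMap_cons, List.flatMap_append, List.flatMap_nil]
      rw [show ((M + (0 + 1) + 1 : Nat) : Int) - 1 = ((M + 1 : Nat) : Int) from by push_cast; ring]
      simp only [beq_self_eq_true, Bool.true_or, Bool.or_true, List.filter_true]
      rw [PySem.List.pyGetD_zero_cons, mapTake r0 n le_rfl]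
      rw [hn, List.take_length, ← hn]
      rw [getLastIdx r0 rl mid, mapTake rl n hrl]
      have hg : ∀ i ∈ PySem.List.pyRange 1 ((M + 1 : Nat) : Int) 1,
          (List.map (fun j => PySem.List.pyGetD (PySem.List.pyGetD (r0 :: (mid ++ [rl])) i []) j 0)
            (List.filter (fun j => i == 0 || i == ((M + 1 : Nat) : Int) || j == 0 || j == ((n : Int)) - 1)
              (PySem.List.pyRange 0 ((n : Int)) 1)))
          = [PySem.List.pyGetD (PySem.List.pyGetD (r0 :: (mid ++ [rl])) i []) 0 0] ++
            (if ((n : Int)) > 1 then [PySem.List.pyGetD (PySem.List.pyGetD (r0 :: (mid ++ [rl])) i []) (((n : Int)) - 1) 0] else []) := by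
        intro i hi
        obtain ⟨hi1, hi2⟩ := PySem.List.mem_pyRange_one.mp hi
        have h0 : (i == (0 : Int)) = false := by simp; omega
        have h1 : (i == ((M + 1 : Nat) : Int)) = false := by simp; omega
        simp only [h0, h1, Bool.false_or]
        rw [filterBorder n (by omega)]
        by_cases hb : (1 : Int) < ((n : Int))
        · simp [hb]
        · simp [hb]
      rw [List.flatMap_congr hg]
      have hswap := List.flatMap_map (fun i => PySem.List.pyGetD (r0 :: (mid ++ [rl])) i [])
        (fun row => [PySem.List.pyGetD row 0 0] ++
          if ((n : Int)) > 1 then [PySem.List.pyGetD row (((n : Int)) - 1) 0] else [])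
        (PySem.List.pyRange 1 ((M + 1 : Nat) : Int) 1)
      rw [mapMid] at hswap
      rw [← hswap]
      -- B side
      rw [if_neg (by simp [hn0]), if_neg (by simp)]
      rw [hsliceMid]
      simp only [List.append_assoc]
      rw [PySem.List.foldl_append_eq_flatMap]
      have hneg : PySem.List.pyGetD (r0 :: (mid ++ [rl])) (-1) [] = rl := by
        rw [show (r0 :: (mid ++ [rl])) = ((r0 :: mid) ++ [rl]) from by simp]
        exact PySem.List.pyGetD_neg_one_append_singleton ..
      rw [hneg, PySem.List.slice_to_natCast]
      simp [List.append_assoc]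

-- ===== VERDICT (by name: the statement is the Claim_ definition above) =====
theorem check_grid_spec : Claim_equal_check_grid := by
  intro grid _ hpre
  exact check_grid_eq grid hpre.1 hpre.2
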